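-- pv_equiv track=rewrite | github.com/HyeonDeul/acmicpc | not_solved/12143_str.py | sent
-- ===== SOURCE A (Python) =====
-- def sent(sentences, eng, fran):
--     if not sentences:
--         list_eng = set(map(str, eng.split()))
--         list_fran = set(map(str, fran.split()))
--         return len(list_eng & list_fran)
--     else:
--         sentence = sentences.pop()
--         t_eng = eng
--         t_fran = fran
--         for word in sentence.split():
--             t_eng += ' '+word
--             t_fran += ' '+word
--         both = min(sent(sentences[:], t_eng, fran),
--                    sent(sentences[:], eng, t_fran))
--         return both
-- ===== SOURCE B (Python) =====
-- # B: iterative bitmask enumeration instead of A's branching recursion.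
-- # Note: B does not mutate `sentences` (A pops its last element); equivalence is about the return value.
-- def sent(sentences, eng, fran):
--     chunks = [''.join(' ' + w for w in s.split()) for s in reversed(sentences)]
--     n = len(chunks)
--     best = None
--     for mask in range(1 << n):
--         e, f, m = eng, fran, mask
--         for ch in chunks:
--             if m & 1:
--                 e += ch
--             else:
--                 f += ch
--             m >>= 1
--         c = len(set(e.split()) & set(f.split()))
--         if best is None or c < best:
--             best = c
--     return best
-- ===== Notes on version B (the rewrite author's own statement) =====
-- stated objective: alternative
-- what changed: Replaces A's branching recursion (which pops the last sentence, copies the list at every node, and recurses twice) with a single iterative loop over all 2^n bitmask assignments, precomputing each sentence's appended word chunk once and taking the running minimum of the shared-word counts; B does not mutate the caller's list (A pops its last element), the return value is identical.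
import Mathlib
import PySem

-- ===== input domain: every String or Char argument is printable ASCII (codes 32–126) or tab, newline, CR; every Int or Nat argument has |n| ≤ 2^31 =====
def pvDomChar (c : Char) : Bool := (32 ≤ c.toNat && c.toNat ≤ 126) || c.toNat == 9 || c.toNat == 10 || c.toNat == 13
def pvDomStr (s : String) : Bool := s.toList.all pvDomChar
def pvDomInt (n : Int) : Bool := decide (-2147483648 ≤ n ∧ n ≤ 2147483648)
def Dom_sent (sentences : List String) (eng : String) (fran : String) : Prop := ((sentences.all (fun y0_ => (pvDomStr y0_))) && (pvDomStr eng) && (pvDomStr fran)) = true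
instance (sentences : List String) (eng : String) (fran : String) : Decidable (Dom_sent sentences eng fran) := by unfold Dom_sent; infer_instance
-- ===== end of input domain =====

-- B replaces A's branching recursion by a single loop over all 2^n bitmask assignments (objective: alternative).
-- Side effects: A pops the last element of `sentences`, B leaves the list untouched; the equivalence proved is about the return value.

-- ===== PORT A =====
-- len(set(map(str, e.split())) & set(map(str, f.split())))
def cntA (e f : List Char) : Int :=
  let list_eng := PySem.Set.ofList ((PySem.Chars.split₀ e).map (fun w => w))
  let list_fran := PySem.Set.ofList ((PySem.Chars.split₀ f).map (fun w => w))
  ((PySem.Set.inter list_eng list_fran).length : Int)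

def sentChars : List String → List Char → List Char → Int
  | [], eng, fran => cntA eng fran
  | s :: rest, eng, fran =>
    let sentence := (s :: rest).getLast (by simp)      -- sentences.pop()
    let remaining := (s :: rest).dropLast              -- sentences after the pop (sentences[:] copies it)
    -- for word in sentence.split(): t_eng += ' '+word; t_fran += ' '+word
    let t := (PySem.Chars.split₀ sentence.toList).foldl
        (fun (p : List Char × List Char) w => (p.1 ++ ' ' :: w, p.2 ++ ' ' :: w)) (eng, fran)
    min (sentChars remaining t.1 fran) (sentChars remaining eng t.2)
termination_by l _ _ => l.length
decreasing_by all_goals simp [List.length_dropLast]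

def sent (sentences : List String) (eng : String) (fran : String) : Int :=
  sentChars sentences eng.toList fran.toList

-- ===== PORT B =====
-- ''.join(' ' + w for w in s.split())
def chunkOf (s : List Char) : List Char :=
  (PySem.Chars.split₀ s).foldl (fun acc w => acc ++ ' ' :: w) []

-- len(set(e.split()) & set(f.split()))
def cntB (e f : List Char) : Int :=
  ((PySem.Set.inter (PySem.Set.ofList (PySem.Chars.split₀ e))
                    (PySem.Set.ofList (PySem.Chars.split₀ f))).length : Int)

-- the body of B's outer loop for one mask: distribute the chunks, then count the shared words
def bodyB (chunks : List (List Char)) (mask : Int) (e f : List Char) : Int :=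
  let s := chunks.foldl
      (fun (p : List Char × List Char × Int) ch =>
        if PySem.Int.band p.2.2 1 ≠ 0 then (p.1 ++ ch, p.2.1, p.2.2 >>> (1 : Nat))
        else (p.1, p.2.1 ++ ch, p.2.2 >>> (1 : Nat)))
      (e, f, mask)
  cntB s.1 s.2.1

def sent_alt (sentences : List String) (eng : String) (fran : String) : Int :=
  let chunks := sentences.reverse.map (fun s => chunkOf s.toList)
  let n := chunks.length
  let best := (PySem.List.pyRange 0 ((1 : Int) <<< (n : Int)) 1).foldl
      (fun (best : Option Int) mask =>
        let c := bodyB chunks mask eng.toList fran.toList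
        match best with
        | none => some c
        | some b => if c < b then some c else some b)
      none
  match best with
  | some b => b
  | none => 0   -- unreachable: the range 0 .. 2^n is never empty

-- ===== PRECONDITION & SPEC =====
def Spec_sent (sentences : List String) (eng : String) (fran : String) (out : Int) : Prop := out = sent_alt sentences eng fran
instance (sentences : List String) (eng : String) (fran : String) (out : Int) : Decidable (Spec_sent sentences eng fran out) := by unfold Spec_sent; infer_instance

-- ===== CLAIM (what is proved, stated in full; the proofs are below) =====
def Claim_equal_sent : Prop := ∀ (sentences : List String) (eng : String) (fran : String), Dom_sent sentences eng fran → Spec_sent sentences eng fran (sent sentences eng fran)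

-- ===== LEMMAS AND PROOFS =====

theorem cntA_eq_cntB (e f : List Char) : cntA e f = cntB e f := by
  simp [cntA, cntB, List.map_id']

-- the mathematical shape shared by both programs: pick a side for each chunk, head first
def G : List (List Char) → List Char → List Char → Int
  | [], e, f => cntB e f
  | c :: t, e, f => min (G t (e ++ c) f) (G t e (f ++ c))

theorem sentChars_unfold (l : List String) (hne : l ≠ []) (e f : List Char) :
    sentChars l e f =
      min (sentChars l.dropLast
            ((PySem.Chars.split₀ (l.getLast hne).toList).foldl
              (fun (p : List Char × List Char) w => (p.1 ++ ' ' :: w, p.2 ++ ' ' :: w)) (e, f)).1 f)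
          (sentChars l.dropLast e
            ((PySem.Chars.split₀ (l.getLast hne).toList).foldl
              (fun (p : List Char × List Char) w => (p.1 ++ ' ' :: w, p.2 ++ ' ' :: w)) (e, f)).2) := by
  cases l with
  | nil => exact absurd rfl hne
  | cons a rest => rw [sentChars]

theorem sentChars_eq_G (l : List String) (e f : List Char) :
    sentChars l e f = G (l.reverse.map (fun s => chunkOf s.toList)) e f := by
  induction l using List.reverseRecOn generalizing e f with
  | nil => simp [sentChars, G, cntA_eq_cntB]
  | append_singleton t s ih =>
    have hpair : (PySem.Chars.split₀ s.toList).foldl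
        (fun (p : List Char × List Char) w => (p.1 ++ ' ' :: w, p.2 ++ ' ' :: w)) (e, f)
        = (e ++ chunkOf s.toList, f ++ chunkOf s.toList) := by
      rw [PySem.List.foldl_prod_mk (f := fun acc w => acc ++ ' ' :: w)
          (g := fun acc w => acc ++ ' ' :: w)]
      simp [chunkOf]
    rw [sentChars_unfold (t ++ [s]) (by simp)]
    rw [List.getLast_concat, List.dropLast_concat]
    rw [hpair, ih, ih]
    simp [G]

theorem bodyB_nil (mask : Int) (e f : List Char) : bodyB [] mask e f = cntB e f := rfl

theorem bodyB_cons (c : List Char) (t : List (List Char)) (mask : Int) (e f : List Char) :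
    bodyB (c :: t) mask e f =
      if PySem.Int.band mask 1 ≠ 0 then bodyB t (mask >>> (1 : Nat)) (e ++ c) f
      else bodyB t (mask >>> (1 : Nat)) e (f ++ c) := by
  by_cases hb : PySem.Int.band mask 1 ≠ 0
  · rw [if_pos hb]
    simp only [bodyB, List.foldl_cons]
    rw [if_pos (by simpa using hb)]
  · rw [if_neg hb]
    simp only [bodyB, List.foldl_cons]
    rw [if_neg (by simpa using hb)]

theorem shiftRight_one (m : Int) : m >>> (1 : Nat) = m / 2 := by
  simpa using Int.shiftRight_eq_div_pow m 1

theorem band_one_emod (m : Int) : PySem.Int.band m 1 = m % 2 := by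
  rw [PySem.Int.band_one, PySem.Int.mod_eq_emod_of_pos (by norm_num)]

-- G is the minimum of bodyB over all masks in [0, 2^(length)): attained, and a lower bound
theorem G_isMin (cs : List (List Char)) (e f : List Char) :
    (∃ m ∈ PySem.List.pyRange 0 ((2 : Int) ^ cs.length) 1, bodyB cs m e f = G cs e f) ∧
    (∀ m ∈ PySem.List.pyRange 0 ((2 : Int) ^ cs.length) 1, G cs e f ≤ bodyB cs m e f) := by
  induction cs generalizing e f with
  | nil =>
    constructor
    · exact ⟨0, by simp [PySem.List.mem_pyRange_one], rfl⟩
    · intro m hm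
      exact le_of_eq (bodyB_nil m e f).symm
  | cons c t ih =>
    constructor
    · -- attainment: the min is one of the two G-branches; lift its witness
      rcases le_total (G t (e ++ c) f) (G t e (f ++ c)) with hle | hle
      · obtain ⟨m, hm, hv⟩ := (ih (e ++ c) f).1
        rw [PySem.List.mem_pyRange_one] at hm
        refine ⟨2 * m + 1, ?_, ?_⟩
        · rw [PySem.List.mem_pyRange_one]
          have hp : (2 : Int) ^ (c :: t).length = 2 * 2 ^ t.length := by
            rw [List.length_cons, pow_succ]; ring
          omega
        · rw [bodyB_cons]
          have h1 : PySem.Int.band (2 * m + 1) 1 ≠ 0 := by rw [band_one_emod]; omega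
          have h2 : (2 * m + 1) >>> (1 : Nat) = m := by rw [shiftRight_one]; omega
          rw [if_pos h1, h2, hv]
          simp [G, min_eq_left hle]
      · obtain ⟨m, hm, hv⟩ := (ih e (f ++ c)).1
        rw [PySem.List.mem_pyRange_one] at hm
        refine ⟨2 * m, ?_, ?_⟩
        · rw [PySem.List.mem_pyRange_one]
          have hp : (2 : Int) ^ (c :: t).length = 2 * 2 ^ t.length := by
            rw [List.length_cons, pow_succ]; ring
          omega
        · rw [bodyB_cons]
          have h1 : ¬ PySem.Int.band (2 * m) 1 ≠ 0 := by rw [band_one_emod]; omega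
          have h2 : (2 * m) >>> (1 : Nat) = m := by rw [shiftRight_one]; omega
          rw [if_neg h1, h2, hv]
          simp [G, min_eq_right hle]
    · intro m hm
      rw [PySem.List.mem_pyRange_one] at hm
      have hhalf : m >>> (1 : Nat) ∈ PySem.List.pyRange 0 ((2 : Int) ^ t.length) 1 := by
        rw [PySem.List.mem_pyRange_one, shiftRight_one]
        have : (2 : Int) ^ (c :: t).length = 2 * (2 : Int) ^ t.length := by
          rw [List.length_cons, pow_succ]; ring
        rw [this] at hm
        omega
      rw [bodyB_cons]
      by_cases hb : PySem.Int.band m 1 ≠ 0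
      · rw [if_pos hb]
        calc G (c :: t) e f ≤ G t (e ++ c) f := by simp [G]
          _ ≤ bodyB t (m >>> (1 : Nat)) (e ++ c) f := (ih (e ++ c) f).2 _ hhalf
      · rw [if_neg hb]
        calc G (c :: t) e f ≤ G t e (f ++ c) := by simp [G]
          _ ≤ bodyB t (m >>> (1 : Nat)) e (f ++ c) := (ih e (f ++ c)).2 _ hhalf

-- B's best-so-far loop over a nonempty list computes `some` of the running minimum
theorem optFold_some (t : List Int) (x : Int) :
    t.foldl (fun (best : Option Int) c =>
        match best with
        | none => some c
        | some b => if c < b then some c else some b) (some x)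
      = some (t.foldl min x) := by
  induction t generalizing x with
  | nil => rfl
  | cons c t ih =>
    simp only [List.foldl_cons]
    have hstep : (if c < x then some c else some x) = some (min x c) := by
      by_cases h : c < x
      · rw [min_eq_right (le_of_lt h)]; simp [h]
      · rw [min_eq_left (not_lt.mp h)]; simp [h]
    rw [hstep, ih]

theorem optFold_none (x : Int) (t : List Int) :
    (x :: t).foldl (fun (best : Option Int) c =>
        match best with
        | none => some c
        | some b => if c < b then some c else some b) none
      = some (t.foldl min x) := by
  simp only [List.foldl_cons]
  exact optFold_some t x

-- pull the per-mask value computation out of B's loop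
theorem optFold_map (masks : List Int) (g : Int → Int) :
    masks.foldl (fun (best : Option Int) mask =>
        match best with
        | none => some (g mask)
        | some b => if g mask < b then some (g mask) else some b) none
      = (masks.map g).foldl (fun (best : Option Int) c =>
        match best with
        | none => some c
        | some b => if c < b then some c else some b) none := by
  rw [List.foldl_map]

-- ===== VERDICT (by name: the statement is the Claim_ definition above) =====
theorem sent_spec : Claim_equal_sent := by
  intro sentences eng fran _
  unfold Spec_sent
  simp only [sent, sent_alt]
  rw [sentChars_eq_G]
  set cs := sentences.reverse.map (fun s => chunkOf s.toList) with hcs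
  set g : Int → Int := fun m => bodyB cs m eng.toList fran.toList with hg
  have hpow : (1 : Int) <<< ((cs.length : Nat) : Int) = (2 : Int) ^ cs.length := by
    exact_mod_cast Int.one_shiftLeft cs.length
  rw [hpow]
  have hne : (0 : Int) < (2 : Int) ^ cs.length := by positivity
  rw [PySem.List.pyRange_one_cons hne]
  rw [optFold_map (g := g)]
  rw [List.map_cons, optFold_none]
  -- both sides are the minimum of the same family of values
  obtain ⟨hatt, hlb⟩ := G_isMin cs eng.toList fran.toList
  have hfold := PySem.List.foldl_min_le
    ((PySem.List.pyRange (0 + 1) ((2 : Int) ^ cs.length) 1).map g) (g 0)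
  have hmem := PySem.List.foldl_min_mem
    ((PySem.List.pyRange (0 + 1) ((2 : Int) ^ cs.length) 1).map g) (g 0)
  set v := ((PySem.List.pyRange (0 + 1) ((2 : Int) ^ cs.length) 1).map g).foldl min (g 0) with hv
  have hrange0 : (0 : Int) ∈ PySem.List.pyRange 0 ((2 : Int) ^ cs.length) 1 := by
    rw [PySem.List.mem_pyRange_one]; omega
  have hGle : G cs eng.toList fran.toList ≤ v := by
    rcases hmem with h | h
    · rw [h]; exact hlb 0 hrange0
    · obtain ⟨m, hm, hgm⟩ := List.mem_map.mp h
      rw [← hgm]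
      refine hlb m ?_
      rw [PySem.List.mem_pyRange_one] at hm ⊢
      omega
  have hleG : v ≤ G cs eng.toList fran.toList := by
    obtain ⟨m, hm, hgm⟩ := hatt
    rw [← hgm]
    rw [PySem.List.mem_pyRange_one] at hm
    by_cases hm0 : m = 0
    · subst hm0; exact hfold.1
    · refine hfold.2 (g m) (List.mem_map.mpr ⟨m, ?_, rfl⟩)
      rw [PySem.List.mem_pyRange_one]
      omega
  exact (le_antisymm hleG hGle).symm
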